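-- pv_equiv track=rewrite | github.com/thecolorblue/snow_day | src/main.py | extract_ordered_required_words
-- ===== SOURCE A (Python) =====
-- import string
--
-- def extract_ordered_required_words(response, required_words):
--     # Convert response to lowercase
--     response_lower = response.lower()
--
--     # Remove punctuation using str.translate and str.maketrans
--     translator = str.maketrans('', '', string.punctuation)
--     cleaned_response = response_lower.translate(translator)
--
--     # Split the cleaned response into words
--     words = cleaned_response.split()
--
--     # Use a set to track seen words and maintain order with a list comprehension
--     seen = set()
--     ordered_required_words = [word for word in words if word in required_words and not (word in seen or seen.add(word))]
--
--     return ordered_required_words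
-- ===== SOURCE B (Python) =====
-- import string
--
-- def extract_ordered_required_words(response, required_words):
--     # Identical tokenization to the original: lowercase, strip punctuation, split.
--     words = response.lower().translate(str.maketrans('', '', string.punctuation)).split()
--     # Index table: first occurrence position of every token.
--     first_index = {}
--     for i, word in enumerate(words):
--         if word not in first_index:
--             first_index[word] = i
--     # Drive the output from required_words: keep those that occur, order by first occurrence.
--     present = {word for word in required_words if word in first_index}
--     return sorted(present, key=lambda word: first_index[word])
-- ===== Notes on version B (the rewrite author's own statement) =====
-- stated objective: alternative
-- what changed: Instead of scanning every token and testing list membership in required_words per token with a seen-set, B builds a first-occurrence index table over the tokens once, filters required_words against it, and sorts the hits by first index; it trades A's per-token list scan for an index table plus a sort.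
import Mathlib
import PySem

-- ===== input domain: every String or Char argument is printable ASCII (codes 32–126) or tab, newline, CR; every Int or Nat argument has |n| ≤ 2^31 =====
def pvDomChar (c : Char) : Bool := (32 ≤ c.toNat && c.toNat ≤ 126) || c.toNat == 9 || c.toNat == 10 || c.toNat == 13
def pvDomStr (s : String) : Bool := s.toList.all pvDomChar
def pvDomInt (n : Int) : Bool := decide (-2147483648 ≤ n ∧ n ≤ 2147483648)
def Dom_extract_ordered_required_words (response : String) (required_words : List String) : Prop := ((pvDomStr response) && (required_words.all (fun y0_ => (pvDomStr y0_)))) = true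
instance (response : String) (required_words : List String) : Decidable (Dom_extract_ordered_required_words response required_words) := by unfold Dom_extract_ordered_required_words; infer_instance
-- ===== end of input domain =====

-- B replaces A's per-token scan (membership test against required_words plus a seen-set) by a
-- first-occurrence index table over the tokens, filtering required_words against it and sorting by first index.

-- string.punctuation, as a literal character list
def pvPunct : List Char := ['!','"','#','$','%','&','\'','(',')','*','+',',','-','.','/',':',';','<','=','>','?','@','[','\\',']','^','_','`','{','|','}','~']

-- ===== PORT A =====
def extract_ordered_required_words (response : String) (required_words : List String) : List String :=
  let response_lower := PySem.Str.lower response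
  -- .translate(str.maketrans('', '', string.punctuation)) deletes punctuation chars (ported by hand; exact)
  let cleaned_response := String.mk (response_lower.toList.filter (fun c => !(pvPunct.contains c)))
  let words := PySem.Str.split₀ cleaned_response
  (words.foldl
    (fun (st : List String × PySem.Set String) word =>
      if required_words.contains word && !(PySem.Set.contains st.2 word) then
        (st.1 ++ [word], PySem.Set.add st.2 word)
      else st)
    ([], PySem.Set.empty)).1

-- ===== PORT B =====
def extract_ordered_required_words_alt (response : String) (required_words : List String) : List String :=
  let words := PySem.Str.split₀ (String.mk ((PySem.Str.lower response).toList.filter (fun c => !(pvPunct.contains c))))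
  let first_index := (PySem.List.enumerate words).foldl
      (fun (d : PySem.Dict String Int) p => if d.contains p.2 then d else d.insert p.2 p.1)
      PySem.Dict.empty
  let present : PySem.Set String := PySem.Set.ofList (required_words.filter (fun word => first_index.contains word))
  -- sort keys are the (distinct) first-occurrence indices, so sorting the set is order-safe
  PySem.List.sorted present (fun word => first_index.getD word 0) false

-- ===== PRECONDITION & SPEC =====
def Spec_extract_ordered_required_words (response : String) (required_words : List String) (out : List String) : Prop := out = extract_ordered_required_words_alt response required_words
instance (response : String) (required_words : List String) (out : List String) : Decidable (Spec_extract_ordered_required_words response required_words out) := by unfold Spec_extract_ordered_required_words; infer_instance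

-- ===== CLAIM (what is proved, stated in full; the proofs are below) =====
def Claim_equal_extract_ordered_required_words : Prop := ∀ (response : String) (required_words : List String), Dom_extract_ordered_required_words response required_words → Spec_extract_ordered_required_words response required_words (extract_ordered_required_words response required_words)

-- ===== LEMMAS AND PROOFS =====

-- A's scan-and-filter loop keeps its two accumulators equal and is the ordered dedup of the required tokens
theorem foldA_eq (R : List String) (ws : List String) (s : PySem.Set String) :
    (ws.foldl
      (fun (st : List String × PySem.Set String) word =>
        if R.contains word && !(PySem.Set.contains st.2 word) then
          (st.1 ++ [word], PySem.Set.add st.2 word)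
        else st) (s, s)).1
    = (ws.filter (fun w => R.contains w)).foldl PySem.Set.add s := by
  induction ws generalizing s with
  | nil => rfl
  | cons w t ih =>
    rw [List.foldl_cons, List.filter_cons]
    by_cases hR : R.contains w = true
    · by_cases hs : PySem.Set.contains s w = true
      · have hcond : (R.contains w && !(PySem.Set.contains s w)) = false := by
          rw [hR, hs]; rfl
        have hadd : PySem.Set.add s w = s := by
          simp only [PySem.Set.add, PySem.Set.contains] at hs ⊢
          rw [if_pos hs]
        simp only [hcond, Bool.false_eq_true, if_false, if_pos hR, List.foldl_cons, hadd]
        exact ih s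
      · have hs' : PySem.Set.contains s w = false := Bool.eq_false_iff.mpr hs
        have hcond : (R.contains w && !(PySem.Set.contains s w)) = true := by
          rw [hR, hs']; rfl
        have hadd : PySem.Set.add s w = s ++ [w] := by
          simp only [PySem.Set.add, PySem.Set.contains] at hs ⊢
          rw [if_neg hs]
        simp only [hcond, if_true, if_pos hR, List.foldl_cons, hadd]
        exact ih (s ++ [w])
    · have hR' : R.contains w = false := by simpa using hR
      have hcond : (R.contains w && !(PySem.Set.contains s w)) = false := by
        rw [hR']; rfl
      simp only [hcond, Bool.false_eq_true, if_false, if_neg hR]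
      exact ih s

-- the first_index fold, characterised: lookup = earliest enumerate index
theorem fi_get? (l : List String) (s : Int) (d : PySem.Dict String Int) (w : String) :
    ((PySem.List.enumerate l s).foldl
        (fun (d : PySem.Dict String Int) p => if d.contains p.2 then d else d.insert p.2 p.1) d).get? w
    = (d.get? w).or ((List.idxOf? w l).map (fun (k : Nat) => s + (k : Int))) := by
  induction l generalizing s d with
  | nil => simp [PySem.List.enumerate]
  | cons x t ih =>
    rw [PySem.List.enumerate_cons, List.foldl_cons, ih, List.idxOf?_cons]
    by_cases hxw : x = w
    · subst hxw
      by_cases hc : d.contains x = true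
      · have hsome : (d.get? x).isSome = true := by
          rw [← PySem.Dict.contains_eq_isSome_get?]; exact hc
        obtain ⟨v, hv⟩ := Option.isSome_iff_exists.mp hsome
        rw [if_pos hc, hv]
        simp
      · have hc' : d.contains x = false := by simpa using hc
        have hnone : d.get? x = none := by
          have h2 := PySem.Dict.contains_eq_isSome_get? d x
          rw [hc'] at h2
          exact Option.not_isSome_iff_eq_none.mp (by rw [← h2]; simp)
        rw [if_neg hc, PySem.Dict.get?_insert_self, hnone]
        simp
    · have hbe : (x == w) = false := by simpa using hxw
      have hget : (if d.contains x = true then d else d.insert x s).get? w = d.get? w := by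
        split
        · rfl
        · exact PySem.Dict.get?_insert_of_ne d s (Ne.symm hxw)
      rw [hget, hbe]
      cases h : List.idxOf? w t with
      | none => simp
      | some k =>
        have hk : s + 1 + (k : Int) = s + ((k + 1 : Nat) : Int) := by push_cast; ring
        simp [hk]

-- a found index is the first index
theorem idxOf?_of_mem (l : List String) (a : String) (h : a ∈ l) :
    List.idxOf? a l = some (l.idxOf a) := by
  induction l with
  | nil => simp at h
  | cons x t ih =>
    rw [List.idxOf?_cons]
    by_cases hx : x = a
    · subst hx; simp
    · have hbe : (x == a) = false := by simpa using hx
      have ht : a ∈ t := by cases h with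
        | head => exact absurd rfl hx
        | tail _ h2 => exact h2
      simp [hbe, List.idxOf_cons, ih ht]

-- deduplication commutes with value filtering
theorem foldl_add_filter (l : List String) (p : String → Bool) (s : PySem.Set String) :
    (l.foldl PySem.Set.add s).filter p = (l.filter p).foldl PySem.Set.add (s.filter p) := by
  induction l generalizing s with
  | nil => rfl
  | cons x t ih =>
    rw [List.foldl_cons, ih, List.filter_cons]
    by_cases hx : p x = true
    · have h1 : (PySem.Set.add s x).filter p = PySem.Set.add (List.filter p s) x := by
        by_cases hs : x ∈ s
        · have hc : PySem.Set.contains s x = true := List.contains_iff_mem.mpr hs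
          have hc2 : PySem.Set.contains (List.filter p s) x = true :=
            List.contains_iff_mem.mpr (List.mem_filter.mpr ⟨hs, hx⟩)
          simp only [PySem.Set.add, PySem.Set.contains] at hc hc2 ⊢
          rw [if_pos hc, if_pos hc2]
        · have hc : ¬ (PySem.Set.contains s x = true) :=
            fun h => hs (List.contains_iff_mem.mp h)
          have hc2 : ¬ (PySem.Set.contains (List.filter p s) x = true) :=
            fun h => hs (List.mem_filter.mp (List.contains_iff_mem.mp h)).1
          simp only [PySem.Set.add, PySem.Set.contains] at hc hc2 ⊢
          rw [if_neg hc, if_neg hc2, List.filter_append, List.filter_cons]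
          simp [hx]
      rw [h1, if_pos hx, List.foldl_cons]
    · have h1 : (PySem.Set.add s x).filter p = s.filter p := by
        by_cases hs : x ∈ s
        · have hc : PySem.Set.contains s x = true := List.contains_iff_mem.mpr hs
          simp only [PySem.Set.add, PySem.Set.contains] at hc ⊢
          rw [if_pos hc]
        · have hc : ¬ (PySem.Set.contains s x = true) :=
            fun h => hs (List.contains_iff_mem.mp h)
          simp only [PySem.Set.add, PySem.Set.contains] at hc ⊢
          rw [if_neg hc, List.filter_append, List.filter_cons]
          simp [hx]
      rw [h1, if_neg hx]

theorem ofList_filter (l : List String) (p : String → Bool) :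
    PySem.Set.ofList (l.filter p) = (PySem.Set.ofList l).filter p := by
  rw [PySem.Set.ofList, PySem.Set.ofList, foldl_add_filter]; rfl

-- a deduplicated list is ordered by first-occurrence index
theorem pairwise_idxOf (l : List String) :
    (PySem.Set.ofList l).Pairwise (fun a b => l.idxOf a < l.idxOf b) := by
  induction l using List.reverseRecOn with
  | nil => simp [PySem.Set.ofList, PySem.Set.empty]
  | append_singleton l x ih =>
    have hof : PySem.Set.ofList (l ++ [x]) = PySem.Set.add (PySem.Set.ofList l) x := by
      rw [PySem.Set.ofList, PySem.Set.ofList, List.foldl_append]; rfl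
    rw [hof, PySem.Set.add]
    by_cases hc : PySem.Set.contains (PySem.Set.ofList l) x = true
    · rw [if_pos hc]
      refine ih.imp_of_mem ?_
      intro a b ha hb hab
      have ha' : a ∈ l := (PySem.Set.mem_ofList l a).mp ha
      have hb' : b ∈ l := (PySem.Set.mem_ofList l b).mp hb
      rwa [List.idxOf_append_of_mem ha', List.idxOf_append_of_mem hb']
    · have hxl : x ∉ l := fun hmem =>
        hc (List.contains_iff_mem.mpr ((PySem.Set.mem_ofList l x).mpr hmem))
      rw [if_neg hc, List.pairwise_append]
      refine ⟨ih.imp_of_mem ?_, by simp, ?_⟩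
      · intro a b ha hb hab
        have ha' : a ∈ l := (PySem.Set.mem_ofList l a).mp ha
        have hb' : b ∈ l := (PySem.Set.mem_ofList l b).mp hb
        rwa [List.idxOf_append_of_mem ha', List.idxOf_append_of_mem hb']
      · intro a ha b hb
        have ha' : a ∈ l := (PySem.Set.mem_ofList l a).mp ha
        have hb' : b = x := by simpa using hb
        subst hb'
        rw [List.idxOf_append_of_mem ha', List.idxOf_append_of_notMem hxl]
        have h1 : l.idxOf a < l.length := List.idxOf_lt_length_of_mem ha'
        have h2 : List.idxOf b [b] = 0 := by simp
        omega

-- the common core: for any token list ws, A's loop equals B's table-and-sort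
theorem core_eq (ws R : List String) :
    (ws.foldl
      (fun (st : List String × PySem.Set String) word =>
        if R.contains word && !(PySem.Set.contains st.2 word) then
          (st.1 ++ [word], PySem.Set.add st.2 word)
        else st) (PySem.Set.empty, PySem.Set.empty)).1
    = PySem.List.sorted
        (PySem.Set.ofList (R.filter (fun word =>
          ((PySem.List.enumerate ws 0).foldl
            (fun (d : PySem.Dict String Int) p => if d.contains p.2 then d else d.insert p.2 p.1)
            PySem.Dict.empty).contains word)))
        (fun word =>
          ((PySem.List.enumerate ws 0).foldl
            (fun (d : PySem.Dict String Int) p => if d.contains p.2 then d else d.insert p.2 p.1)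
            PySem.Dict.empty).getD word 0) false := by
  set FI : PySem.Dict String Int := (PySem.List.enumerate ws 0).foldl
      (fun (d : PySem.Dict String Int) p => if d.contains p.2 then d else d.insert p.2 p.1)
      PySem.Dict.empty with hFI
  have hfi : ∀ w, FI.get? w = (List.idxOf? w ws).map (fun (k : Nat) => (k : Int)) := by
    intro w
    rw [hFI, fi_get?, PySem.Dict.get?_empty, Option.none_or]
    simp
  have hcont : ∀ w, FI.contains w = true ↔ w ∈ ws := by
    intro w
    rw [PySem.Dict.contains_eq_isSome_get?, hfi w, Option.isSome_map,
      ← PySem.List.index?_eq_idxOf?]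
    exact PySem.List.index?_isSome_iff ws w
  have hkey : ∀ w ∈ ws, FI.getD w 0 = (ws.idxOf w : Int) := by
    intro w hw
    rw [PySem.Dict.getD, hfi w, idxOf?_of_mem ws w hw]
    rfl
  have hA : (ws.foldl
      (fun (st : List String × PySem.Set String) word =>
        if R.contains word && !(PySem.Set.contains st.2 word) then
          (st.1 ++ [word], PySem.Set.add st.2 word)
        else st) (PySem.Set.empty, PySem.Set.empty)).1
      = PySem.Set.ofList (ws.filter (fun w => R.contains w)) := by
    rw [foldA_eq]; rfl
  rw [hA]
  have hperm : (PySem.Set.ofList (ws.filter (fun w => R.contains w))).Perm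
      (PySem.Set.ofList (R.filter (fun word => FI.contains word))) := by
    rw [List.perm_ext_iff_of_nodup (PySem.Set.nodup_ofList _) (PySem.Set.nodup_ofList _)]
    intro a
    rw [PySem.Set.mem_ofList, PySem.Set.mem_ofList, List.mem_filter, List.mem_filter]
    constructor
    · rintro ⟨haw, haR⟩
      exact ⟨List.contains_iff_mem.mp haR, (hcont a).mpr haw⟩
    · rintro ⟨haR, hac⟩
      exact ⟨(hcont a).mp hac, List.contains_iff_mem.mpr haR⟩
  have hpair : (PySem.Set.ofList (ws.filter (fun w => R.contains w))).Pairwise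
      (fun a b => FI.getD a 0 < FI.getD b 0) := by
    have h1 : PySem.Set.ofList (ws.filter (fun w => R.contains w))
        = (PySem.Set.ofList ws).filter (fun w => R.contains w) :=
      ofList_filter ws (fun w => R.contains w)
    have h2 : ((PySem.Set.ofList ws).filter (fun w => R.contains w)).Pairwise
        (fun a b => ws.idxOf a < ws.idxOf b) :=
      (pairwise_idxOf ws).filter _
    rw [h1]
    refine h2.imp_of_mem ?_
    intro a b ha hb hab
    have ha' : a ∈ ws := (PySem.Set.mem_ofList ws a).mp (List.mem_filter.mp ha).1
    have hb' : b ∈ ws := (PySem.Set.mem_ofList ws b).mp (List.mem_filter.mp hb).1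
    rw [hkey a ha', hkey b hb']
    exact_mod_cast hab
  have hpair' : (PySem.Set.ofList (ws.filter (fun w => R.contains w))).Pairwise
      (fun a b => (fun word => FI.getD word 0) a < (fun word => FI.getD word 0) b) := hpair
  exact (PySem.List.sorted_eq_of_perm_of_pairwise_lt
    (PySem.Set.ofList (R.filter (fun word => FI.contains word)))
    (PySem.Set.ofList (ws.filter (fun w => R.contains w)))
    (fun word => FI.getD word 0) hperm hpair').symm

-- ===== VERDICT (by name: the statement is the Claim_ definition above) =====
theorem extract_ordered_required_words_spec : Claim_equal_extract_ordered_required_words := by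
  intro response required_words _
  unfold Spec_extract_ordered_required_words
  unfold extract_ordered_required_words extract_ordered_required_words_alt
  exact core_eq _ _
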